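-- pv_equiv track=rewrite | github.com/shealutton/aws | Python/Project Euler/PE-113.py | bouncy
-- ===== SOURCE A (Python) =====
-- def bouncy(number):
--     number_list = str(number)
--     length = len(number_list)
--     up = False
--     down = False
--     position = 0
--     while position < length - 1:
--         if number_list[position] < number_list[position + 1]:
--             down = True
--         if number_list[position] > number_list[position + 1]:
--             up = True
--         if up and down:
--             return False
--         position += 1
--     return True
-- ===== SOURCE B (Python) =====
-- def bouncy(number):
--     s = str(number)
--     chars = list(s)
--     return chars == sorted(chars) or chars == sorted(chars, reverse=True)
-- ===== Notes on version B (the rewrite author's own statement) =====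
-- stated objective: simpler
-- what changed: Replaces the index-walking adjacent-pair scan with two flags and early exit by a direct monotonicity test: the digit string equals its sorted or reverse-sorted version.
import Mathlib
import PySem

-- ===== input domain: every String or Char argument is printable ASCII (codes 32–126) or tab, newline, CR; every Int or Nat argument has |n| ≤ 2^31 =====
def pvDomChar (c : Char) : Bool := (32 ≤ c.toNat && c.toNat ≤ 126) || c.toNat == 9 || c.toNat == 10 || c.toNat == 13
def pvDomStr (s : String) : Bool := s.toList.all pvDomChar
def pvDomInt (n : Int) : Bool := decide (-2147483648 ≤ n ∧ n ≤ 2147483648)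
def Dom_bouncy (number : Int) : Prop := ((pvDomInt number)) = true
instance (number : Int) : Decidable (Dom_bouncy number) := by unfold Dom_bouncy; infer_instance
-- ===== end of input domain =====

-- B replaces A's flagged adjacent-pair scan by comparing the digit string with its sorted and
-- reverse-sorted versions (objective: simpler).

-- ===== PORT A =====
-- the while loop over positions 0..length-2, comparing s[position] with s[position+1],
-- transcribed as structural recursion over the character list with the same up/down flags
def bouncyLoop : List Char → Bool → Bool → Bool
  | a :: b :: rest, up, down =>
      let down := if a < b then true else down
      let up := if a > b then true else up
      if up && down then false
      else bouncyLoop (b :: rest) up down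
  | _, _, _ => true

def bouncy (number : Int) : Bool :=
  bouncyLoop (PySem.Int.toStr number).toList false false

-- ===== PORT B =====
def bouncy_alt (number : Int) : Bool :=
  ((PySem.Int.toStr number).toList == PySem.List.sorted (PySem.Int.toStr number).toList (fun x => x)) ||
  ((PySem.Int.toStr number).toList == PySem.List.sorted (PySem.Int.toStr number).toList (fun x => x) true)

-- ===== PRECONDITION & SPEC =====
def Spec_bouncy (number : Int) (out : Bool) : Prop := out = bouncy_alt number
instance (number : Int) (out : Bool) : Decidable (Spec_bouncy number out) := by unfold Spec_bouncy; infer_instance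

-- ===== CLAIM (what is proved, stated in full; the proofs are below) =====
def Claim_equal_bouncy : Prop := ∀ (number : Int), Dom_bouncy number → Spec_bouncy number (bouncy number)

-- ===== LEMMAS AND PROOFS =====

-- 'down' would be set somewhere in the scan: some adjacent pair ascends
def hasAsc : List Char → Bool
  | a :: b :: rest => (a < b) || hasAsc (b :: rest)
  | _ => false

-- 'up' would be set somewhere in the scan: some adjacent pair descends
def hasDesc : List Char → Bool
  | a :: b :: rest => (a > b) || hasDesc (b :: rest)
  | _ => false

-- the flags are never both set on entry (A returns as soon as both are), hence the hypothesis
theorem bouncyLoop_eq : ∀ (l : List Char) (u d : Bool), (u && d) = false →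
    bouncyLoop l u d = !((u || hasDesc l) && (d || hasAsc l))
  | [], u, d, h => by simp [bouncyLoop, hasDesc, hasAsc]; revert h; cases u <;> cases d <;> simp
  | [a], u, d, h => by simp [bouncyLoop, hasDesc, hasAsc]; revert h; cases u <;> cases d <;> simp
  | a :: b :: rest, u, d, h => by
      have ih1 := bouncyLoop_eq (b :: rest) true false rfl
      have ih2 := bouncyLoop_eq (b :: rest) false true rfl
      have ih3 := bouncyLoop_eq (b :: rest) false false rfl
      simp only [bouncyLoop, hasDesc, hasAsc]
      rcases hlt : decide (a < b) with _ | _ <;> rcases hgt : decide (b < a) with _ | _ <;>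
        cases u <;> cases d <;>
          simp_all [Bool.and_comm];
            (try simp [decide_eq_false (not_lt.2 hlt), decide_eq_false (not_lt.2 hgt), ih3])

theorem hasDesc_eq_false_iff : ∀ (l : List Char),
    hasDesc l = false ↔ l.Pairwise (· ≤ ·)
  | [] => by simp [hasDesc]
  | [a] => by simp [hasDesc]
  | a :: b :: rest => by
      have ih := hasDesc_eq_false_iff (b :: rest)
      simp only [hasDesc, Bool.or_eq_false_iff, decide_eq_false_iff_not, not_lt, ih, gt_iff_lt]
      constructor
      · rintro ⟨hab, hp⟩
        refine hp.cons ?_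
        intro x hx
        rcases List.mem_cons.1 hx with rfl | hx
        · exact hab
        · exact le_trans hab (List.rel_of_pairwise_cons hp hx)
      · intro hp
        exact ⟨List.rel_of_pairwise_cons hp (List.mem_cons_self), hp.of_cons⟩

theorem hasAsc_eq_false_iff : ∀ (l : List Char),
    hasAsc l = false ↔ l.Pairwise (fun a b => b ≤ a)
  | [] => by simp [hasAsc]
  | [a] => by simp [hasAsc]
  | a :: b :: rest => by
      have ih := hasAsc_eq_false_iff (b :: rest)
      simp only [hasAsc, Bool.or_eq_false_iff, decide_eq_false_iff_not, not_lt, ih]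
      constructor
      · rintro ⟨hab, hp⟩
        refine hp.cons ?_
        intro x hx
        rcases List.mem_cons.1 hx with rfl | hx
        · exact hab
        · exact le_trans (List.rel_of_pairwise_cons hp hx) hab
      · intro hp
        exact ⟨List.rel_of_pairwise_cons hp (List.mem_cons_self), hp.of_cons⟩

theorem sorted_asc_iff (l : List Char) :
    (l == PySem.List.sorted l (fun x => x)) = !hasDesc l := by
  rcases h : hasDesc l with _ | _
  · simp [PySem.List.sorted_eq_self_of_pairwise l (fun x => x) ((hasDesc_eq_false_iff l).1 h)]
  · simp only [Bool.not_true, beq_eq_false_iff_ne, ne_eq]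
    intro he
    have hp := PySem.List.sorted_pairwise l (fun x => x)
    rw [← he] at hp
    rw [← hasDesc_eq_false_iff l] at hp
    simp [h] at hp

theorem sorted_desc_iff (l : List Char) :
    (l == PySem.List.sorted l (fun x => x) true) = !hasAsc l := by
  rcases h : hasAsc l with _ | _
  · simp [PySem.List.sorted_rev_eq_self_of_pairwise l (fun x => x) ((hasAsc_eq_false_iff l).1 h)]
  · simp only [Bool.not_true, beq_eq_false_iff_ne, ne_eq]
    intro he
    have hp := PySem.List.sorted_pairwise_rev l (fun x => x)
    rw [← he] at hp
    rw [← hasAsc_eq_false_iff l] at hp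
    simp [h] at hp

-- ===== VERDICT (by name: the statement is the Claim_ definition above) =====
theorem bouncy_spec : Claim_equal_bouncy := by
  intro number _
  unfold Spec_bouncy bouncy bouncy_alt
  rw [bouncyLoop_eq _ false false rfl, sorted_asc_iff, sorted_desc_iff]
  cases hasDesc (PySem.Int.toStr number).toList <;>
    cases hasAsc (PySem.Int.toStr number).toList <;> simp
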